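-- pv_equiv track=rewrite | github.com/improve777/ps | dfs_bfs/avoid_observation.py | solution
-- ===== SOURCE A (Python) =====
-- def solution(n, array):
--     avoid = []
--
--     dx = [-1, 0, 1, 0]
--     dy = [0, -1, 0, 1]
--
--     teachers = []
--     for i in range(n):
--         for j in range(n):
--             if array[i][j] == 'T':
--                 teachers.append((i, j))
--
--     def avoid_all_teachers():
--         for (x, y) in teachers:
--             # 교사가 학생 감시를 했을 경우
--             if check_observation(x, y):
--                 return False
--         return True
--
--     # 학생 감시 성공 여부
--     def check_observation(x, y):
--         for j in range(4):
--             for i in range(1, n):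
--                 nx = x + dx[j] * i
--                 ny = y + dy[j] * i
--
--                 if 0 <= nx < n and 0 <= ny < n:
--                     if array[nx][ny] == 'O':
--                         break
--                     elif array[nx][ny] == 'S':
--                         return True
--         return False
--
--     def dfs(count, array):
--         if count == 3:
--             avoid.append(avoid_all_teachers())
--         else:
--             for i in range(n):
--                 for j in range(n):
--                     if array[i][j] == 'X':
--                         array[i][j] = 'O'
--                         dfs(count + 1, array)
--                         array[i][j] = 'X'
--
--     dfs(0, array)
--
--     for b in avoid:
--         if b:
--             return 'YES'
--
--     return 'NO'
-- ===== SOURCE B (Python) =====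
-- def solution(n, array):
--     empties = [(i, j) for i in range(n) for j in range(n) if array[i][j] == 'X']
--     teachers = [(i, j) for i in range(n) for j in range(n) if array[i][j] == 'T']
--     dirs = [(-1, 0), (0, -1), (1, 0), (0, 1)]
--
--     def sees(x, y, obs):
--         for dx, dy in dirs:
--             for i in range(1, n):
--                 nx, ny = x + dx * i, y + dy * i
--                 if 0 <= nx < n and 0 <= ny < n:
--                     if (nx, ny) in obs or array[nx][ny] == 'O':
--                         break
--                     elif array[nx][ny] == 'S':
--                         return True
--         return False
--
--     def pick(cells, k):
--         if k == 0:
--             return [[]]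
--         if not cells:
--             return []
--         rest = cells[1:]
--         return [[cells[0]] + c for c in pick(rest, k - 1)] + pick(rest, k)
--
--     for obs in pick(empties, 3):
--         if not any(sees(x, y, obs) for (x, y) in teachers):
--             return 'YES'
--     return 'NO'
-- ===== Notes on version B (the rewrite author's own statement) =====
-- stated objective: alternative
-- what changed: Replaced the mutating DFS that enumerates all ordered placements of 3 obstacles (m*(m-1)*(m-2) permutations, grid mutated and restored) by an iterative enumeration of unordered 3-combinations of the precollected empty cells, testing lines of sight against the untouched grid with a membership check for the placed obstacles and returning on the first blocking triple.
import Mathlib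
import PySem

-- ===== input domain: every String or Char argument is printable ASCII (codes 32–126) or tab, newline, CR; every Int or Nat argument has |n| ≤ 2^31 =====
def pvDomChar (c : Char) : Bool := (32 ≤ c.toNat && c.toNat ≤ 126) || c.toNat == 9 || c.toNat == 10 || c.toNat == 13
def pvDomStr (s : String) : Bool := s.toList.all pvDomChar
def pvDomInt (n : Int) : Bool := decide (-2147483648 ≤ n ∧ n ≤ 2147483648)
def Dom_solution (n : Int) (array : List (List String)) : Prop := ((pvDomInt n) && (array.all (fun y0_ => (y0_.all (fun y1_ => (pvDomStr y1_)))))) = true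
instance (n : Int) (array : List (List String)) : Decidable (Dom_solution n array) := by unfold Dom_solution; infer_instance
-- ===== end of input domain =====

-- B replaces A's mutating DFS over all ORDERED placements of 3 obstacles by an enumeration of
-- unordered 3-combinations of the precollected empty cells, checked against the untouched grid
-- (membership test for placed obstacles) with an early return, avoiding the permutation
-- redundancy.  A mutates `array` during its search but fully restores it before returning,
-- so there is no observable side effect to match.

-- ===== PORT A =====
-- array[i][j]; indices come from range(n) / the bounds guard, so they are nonnegative and in
-- range under Pre_solution, where the defaults are unreachable.
def pvCell (g : List (List String)) (i j : Int) : String :=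
  (g.getD i.toNat []).getD j.toNat ""

def pvDxA : List Int := [-1, 0, 1, 0]
def pvDyA : List Int := [0, -1, 0, 1]

-- the two nested 'for i / for j / if 'T': teachers.append((i,j))' loops
def pvTeachersA (n : Int) (g : List (List String)) : List (Int × Int) :=
  (PySem.List.pyRange 0 n 1).foldl (fun acc i =>
    (PySem.List.pyRange 0 n 1).foldl (fun acc j =>
      if pvCell g i j == "T" then acc ++ [(i, j)] else acc) acc) []

-- the inner 'for i in range(1, n)' of check_observation: break on 'O', return True on 'S'
def pvScanA (n : Int) (g : List (List String)) (x y dx dy : Int) : List Int → Bool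
  | [] => false
  | i :: rest =>
    let nx := x + dx * i
    let ny := y + dy * i
    if 0 ≤ nx ∧ nx < n ∧ 0 ≤ ny ∧ ny < n then
      if pvCell g nx ny == "O" then false
      else if pvCell g nx ny == "S" then true
      else pvScanA n g x y dx dy rest
    else pvScanA n g x y dx dy rest

def pvCheckObsA (n : Int) (g : List (List String)) (x y : Int) : Bool :=
  (PySem.List.pyRange 0 4 1).any fun j =>
    pvScanA n g x y (pvDxA.getD j.toNat 0) (pvDyA.getD j.toNat 0) (PySem.List.pyRange 1 n 1)

def pvAvoidAllA (n : Int) (g : List (List String)) (teachers : List (Int × Int)) : Bool :=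
  teachers.all fun p => ! pvCheckObsA n g p.1 p.2

-- array[i][j] = 'O' (the paired restoring write 'X' is the functional threading of the grid)
def pvPlace (g : List (List String)) (i j : Int) : List (List String) :=
  g.set i.toNat ((g.getD i.toNat []).set j.toNat "O")

-- dfs(count, array), indexed by the remaining placements 3 - count
def pvDfsA (n : Int) (teachers : List (Int × Int)) : Nat → List (List String) → List Bool
  | 0, g => [pvAvoidAllA n g teachers]
  | k+1, g =>
    (PySem.List.pyRange 0 n 1).foldl (fun acc i =>
      (PySem.List.pyRange 0 n 1).foldl (fun acc j =>
        if pvCell g i j == "X" then acc ++ pvDfsA n teachers k (pvPlace g i j) else acc) acc) []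

def solution (n : Int) (array : List (List String)) : String :=
  let teachers := pvTeachersA n array
  let avoid := pvDfsA n teachers 3 array
  if avoid.any (fun b => b) then "YES" else "NO"

-- ===== PORT B =====
-- [(i, j) for i in range(n) for j in range(n) if array[i][j] == v]
def pvCellsB (n : Int) (g : List (List String)) (v : String) : List (Int × Int) :=
  (PySem.List.pyRange 0 n 1).flatMap fun i =>
    ((PySem.List.pyRange 0 n 1).filter fun j => pvCell g i j == v).map fun j => (i, j)

def pvDirsB : List (Int × Int) := [(-1, 0), (0, -1), (1, 0), (0, 1)]

-- inner loop of sees: blocked by a placed obstacle (membership) or an existing 'O'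
def pvScanB (n : Int) (g : List (List String)) (x y dx dy : Int)
    (obs : List (Int × Int)) : List Int → Bool
  | [] => false
  | i :: rest =>
    let nx := x + dx * i
    let ny := y + dy * i
    if 0 ≤ nx ∧ nx < n ∧ 0 ≤ ny ∧ ny < n then
      if (nx, ny) ∈ obs ∨ pvCell g nx ny == "O" then false
      else if pvCell g nx ny == "S" then true
      else pvScanB n g x y dx dy obs rest
    else pvScanB n g x y dx dy obs rest

def pvSeesB (n : Int) (g : List (List String)) (x y : Int) (obs : List (Int × Int)) : Bool :=
  pvDirsB.any fun d => pvScanB n g x y d.1 d.2 obs (PySem.List.pyRange 1 n 1)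

-- pick(cells, k): all k-combinations in order
def pvPick : List (Int × Int) → Nat → List (List (Int × Int))
  | _, 0 => [[]]
  | [], _+1 => []
  | c :: rest, k+1 => ((pvPick rest k).map fun t => c :: t) ++ pvPick rest (k+1)

def solution_alt (n : Int) (array : List (List String)) : String :=
  let empties := pvCellsB n array "X"
  let teachers := pvCellsB n array "T"
  if (pvPick empties 3).any (fun obs => teachers.all fun p => ! pvSeesB n array p.1 p.2 obs)
  then "YES" else "NO"

-- ===== PRECONDITION & SPEC =====
-- A reads array[i][j] for all 0 ≤ i, j < n: it raises IndexError unless the first n rows exist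
-- and each has at least n entries; exactly those inputs are excluded.
def Pre_solution (n : Int) (array : List (List String)) : Prop :=
  n ≤ (array.length : Int) ∧ ∀ row ∈ array.take n.toNat, n ≤ (row.length : Int)

instance (n : Int) (array : List (List String)) : Decidable (Pre_solution n array) := by
  unfold Pre_solution; infer_instance

def pvWitness_solution : Int × List (List String) := (2, [["T", "X"], ["X", "S"]])

def Spec_solution (n : Int) (array : List (List String)) (out : String) : Prop :=
  out = solution_alt n array
instance (n : Int) (array : List (List String)) (out : String) : Decidable (Spec_solution n array out) := by
  unfold Spec_solution; infer_instance

-- ===== CLAIM (what is proved, stated in full; the proofs are below) =====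
def Claim_equal_solution : Prop := ∀ (n : Int) (array : List (List String)),
  Dom_solution n array → Pre_solution n array → Spec_solution n array (solution n array)

-- ===== LEMMAS AND PROOFS =====

-- in-bounds coordinates
def pvInB (n : Int) (p : Int × Int) : Prop := 0 ≤ p.1 ∧ p.1 < n ∧ 0 ≤ p.2 ∧ p.2 < n

-- shape of the grid actually used by the proofs, implied by Pre_solution
def pvRowOK (n : Int) (g : List (List String)) : Prop :=
  n ≤ (g.length : Int) ∧ ∀ i : Nat, (i : Int) < n → n ≤ ((g.getD i []).length : Int)

def pvAll (n : Int) : List (Int × Int) :=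
  (PySem.List.pyRange 0 n 1) ×ˢ (PySem.List.pyRange 0 n 1)

def pvPlaceL (S : List (Int × Int)) (g : List (List String)) : List (List String) :=
  S.foldl (fun g p => pvPlace g p.1 p.2) g

theorem pvRowOK_of_pre (n : Int) (g : List (List String)) (h : Pre_solution n g) : pvRowOK n g := by
  obtain ⟨h1, h2⟩ := h
  refine ⟨h1, fun i hi => ?_⟩
  have hlen : i < g.length := by omega
  have hlen2 : i < (g.take n.toNat).length := by simp [List.length_take]; omega
  have hmem : g[i] ∈ g.take n.toNat := by
    have hel : (g.take n.toNat)[i] ∈ g.take n.toNat := List.getElem_mem hlen2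
    rwa [List.getElem_take] at hel
  have := h2 _ hmem
  simpa [List.getD_eq_getElem?_getD, List.getElem?_eq_getElem hlen] using this

theorem pvMem_all (n : Int) (p : Int × Int) : p ∈ pvAll n ↔ pvInB n p := by
  obtain ⟨a, b⟩ := p
  rw [pvAll]
  refine List.mem_product.trans ?_
  simp only [PySem.List.mem_pyRange_one, pvInB]
  tauto

theorem pvAll_nodup (n : Int) : (pvAll n).Nodup :=
  (PySem.List.nodup_pyRange_one 0 n).product (PySem.List.nodup_pyRange_one 0 n)

theorem pvCellsB_eq_filter (n : Int) (g : List (List String)) (v : String) :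
    pvCellsB n g v = (pvAll n).filter (fun p => pvCell g p.1 p.2 == v) := by
  simp [pvCellsB, pvAll, SProd.sprod, List.product, List.filter_flatMap, List.filter_map,
    Function.comp_def]

theorem pvCellsB_nodup (n : Int) (g : List (List String)) (v : String) :
    (pvCellsB n g v).Nodup := by
  rw [pvCellsB_eq_filter]; exact (pvAll_nodup n).filter _

theorem pvMem_cellsB (n : Int) (g : List (List String)) (v : String) (p : Int × Int) :
    p ∈ pvCellsB n g v ↔ pvInB n p ∧ pvCell g p.1 p.2 = v := by
  rw [pvCellsB_eq_filter]
  simp [List.mem_filter, pvMem_all]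

-- one nested append-under-if loop as a flatMap over the filtered range
theorem pvLoop1 {β : Type} (p : Int → Bool) (F : Int → List β) :
    ∀ (L : List Int) (acc : List β),
      L.foldl (fun acc j => if p j then acc ++ F j else acc) acc
        = acc ++ (L.filter p).flatMap F := by
  intro L
  induction L with
  | nil => intro acc; simp
  | cons a L ih =>
    intro acc
    by_cases hp : p a <;> simp [List.foldl_cons, hp, ih, List.append_assoc]

theorem pvLoop2 {β : Type} (R : List Int) (p : Int → Int → Bool) (F : Int → Int → List β) :
    ∀ (L : List Int) (acc : List β),
      L.foldl (fun acc i => R.foldl (fun acc j => if p i j then acc ++ F i j else acc) acc) acc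
        = acc ++ L.flatMap (fun i => (R.filter (fun j => p i j)).flatMap (F i)) := by
  intro L
  induction L with
  | nil => intro acc; simp
  | cons a L ih =>
    intro acc
    simp only [List.foldl_cons]
    rw [pvLoop1 (p a) (F a) R acc, ih, List.flatMap_cons, List.append_assoc]

-- teachers list of A = the 'T' comprehension of B
theorem pvTeachersA_eq (n : Int) (g : List (List String)) :
    pvTeachersA n g = pvCellsB n g "T" := by
  unfold pvTeachersA pvCellsB
  rw [pvLoop2 (PySem.List.pyRange 0 n 1) (fun i j => pvCell g i j == "T")
      (fun i j => [(i, j)]) (PySem.List.pyRange 0 n 1) []]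
  simp only [List.nil_append, ← List.map_eq_flatMap]

theorem pvPlace_row_length (g : List (List String)) (a b : Int) (i : Nat) :
    ((pvPlace g a b).getD i []).length = (g.getD i []).length := by
  by_cases hia : a.toNat = i
  · subst hia
    by_cases hlt : a.toNat < g.length
    · simp [pvPlace, List.getD_eq_getElem?_getD, hlt]
    · rw [pvPlace, List.set_eq_of_length_le (by omega : g.length ≤ a.toNat)]
  · simp [pvPlace, List.getD_eq_getElem?_getD, List.getElem?_set_ne hia]

theorem pvPlace_rowOK (n : Int) (g : List (List String)) (a b : Int)
    (h : pvRowOK n g) : pvRowOK n (pvPlace g a b) := by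
  obtain ⟨h1, h2⟩ := h
  refine ⟨by simpa [pvPlace] using h1, fun i hi => ?_⟩
  rw [pvPlace_row_length]
  exact h2 i hi

theorem pvGet2_set (g : List (List String)) (ai bi ii ji : Nat)
    (ha : ai < g.length) (hb : bi < (g.getD ai []).length) :
    ((g.set ai ((g.getD ai []).set bi "O")).getD ii []).getD ji ""
      = if ai = ii ∧ bi = ji then "O" else (g.getD ii []).getD ji "" := by
  by_cases hi : ai = ii
  · subst hi
    have h1 : (g.set ai ((g.getD ai []).set bi "O")).getD ai []
        = (g.getD ai []).set bi "O" := by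
      simp [List.getD_eq_getElem?_getD, List.getElem?_set_self ha]
    rw [h1]
    by_cases hj : bi = ji
    · subst hj
      rw [if_pos ⟨rfl, rfl⟩, List.getD_eq_getElem?_getD, List.getElem?_set_self hb]
      rfl
    · simp [List.getD_eq_getElem?_getD, List.getElem?_set_ne hj, hj]
  · have h1 : (g.set ai ((g.getD ai []).set bi "O")).getD ii [] = g.getD ii [] := by
      simp [List.getD_eq_getElem?_getD, List.getElem?_set_ne hi]
    rw [h1]
    simp [hi]

-- the single-write read lemma
theorem pvCell_place (n : Int) (g : List (List String)) (hok : pvRowOK n g)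
    (a b i j : Int) (hab : pvInB n (a, b)) (hij : pvInB n (i, j)) :
    pvCell (pvPlace g a b) i j = if (a, b) = (i, j) then "O" else pvCell g i j := by
  obtain ⟨hg, hrow⟩ := hok
  obtain ⟨ha0, han, hb0, hbn⟩ := hab
  obtain ⟨hi0, hin, hj0, hjn⟩ := hij
  have haN : a.toNat < g.length := by omega
  have hrowlen : b.toNat < (g.getD a.toNat []).length := by
    have := hrow a.toNat (by omega); omega
  show ((g.set a.toNat ((g.getD a.toNat []).set b.toNat "O")).getD i.toNat []).getD j.toNat ""
      = _
  rw [pvGet2_set g a.toNat b.toNat i.toNat j.toNat haN hrowlen]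
  have hcond : (a.toNat = i.toNat ∧ b.toNat = j.toNat) ↔ ((a, b) = (i, j)) := by
    rw [Prod.ext_iff]
    constructor
    · rintro ⟨h1, h2⟩; exact ⟨by omega, by omega⟩
    · rintro ⟨h1, h2⟩
      simp only at h1 h2
      exact ⟨by omega, by omega⟩
  rw [if_congr hcond rfl rfl]
  rfl

theorem pvCell_placeL (n : Int) (S : List (Int × Int)) :
    ∀ (g : List (List String)), pvRowOK n g → (∀ p ∈ S, pvInB n p) →
    ∀ (i j : Int), pvInB n (i, j) →
    pvCell (pvPlaceL S g) i j = if (i, j) ∈ S then "O" else pvCell g i j := by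
  induction S with
  | nil => intro g _ _ i j _; simp [pvPlaceL]
  | cons p S ih =>
    intro g hok hS i j hij
    obtain ⟨a, b⟩ := p
    have hab : pvInB n (a, b) := hS _ (by simp)
    have h1 : pvPlaceL ((a, b) :: S) g = pvPlaceL S (pvPlace g a b) := rfl
    rw [h1, ih (pvPlace g a b) (pvPlace_rowOK n g a b hok)
        (fun q hq => hS q (by simp [hq])) i j hij,
      pvCell_place n g hok a b i j hab hij]
    by_cases h2 : (i, j) ∈ S
    · simp [h2]
    · by_cases h3 : (a, b) = (i, j)
      · simp [h2, h3, List.mem_cons]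
      · have h4 : (i, j) ∉ (a, b) :: S := by
          intro hmem
          rcases List.mem_cons.mp hmem with he | hs
          · exact h3 he.symm
          · exact h2 hs
        simp [h2, h3, h4]

theorem pvScan_eq (n : Int) (S : List (Int × Int)) (g : List (List String))
    (hok : pvRowOK n g) (hS : ∀ p ∈ S, pvInB n p) :
    ∀ (x y dx dy : Int) (l : List Int),
    pvScanA n (pvPlaceL S g) x y dx dy l = pvScanB n g x y dx dy S l := by
  intro x y dx dy l
  induction l with
  | nil => rfl
  | cons i rest ih =>
    simp only [pvScanA, pvScanB]
    by_cases hb : 0 ≤ x + dx * i ∧ x + dx * i < n ∧ 0 ≤ y + dy * i ∧ y + dy * i < n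
    · rw [if_pos hb, if_pos hb]
      have hcell := pvCell_placeL n S g hok hS (x + dx * i) (y + dy * i)
        ⟨hb.1, hb.2.1, hb.2.2.1, hb.2.2.2⟩
      by_cases hmem : (x + dx * i, y + dy * i) ∈ S
      · simp [hcell, hmem]
      · simp [hcell, hmem, ih]
    · rw [if_neg hb, if_neg hb]
      exact ih

theorem pvAllCongr {α : Type} (T : List α) (f g : α → Bool)
    (h : ∀ p ∈ T, f p = g p) : T.all f = T.all g := by
  induction T with
  | nil => rfl
  | cons a T ih =>
    simp only [List.all_cons, h a (by simp)]
    rw [ih (fun p hp => h p (by simp [hp]))]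

theorem pvAvoid_eq (n : Int) (S : List (Int × Int)) (g : List (List String))
    (T : List (Int × Int)) (hok : pvRowOK n g) (hS : ∀ p ∈ S, pvInB n p) :
    pvAvoidAllA n (pvPlaceL S g) T = T.all fun p => ! pvSeesB n g p.1 p.2 S := by
  unfold pvAvoidAllA
  apply pvAllCongr
  intro p _
  congr 1
  unfold pvCheckObsA pvSeesB pvDirsB
  have h4 : PySem.List.pyRange 0 4 1 = [0, 1, 2, 3] := by decide
  rw [h4]
  simp only [List.any_cons, List.any_nil, Bool.or_false]
  have d0 : pvDxA.getD (Int.toNat 0) 0 = -1 := by decide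
  have d1 : pvDxA.getD (Int.toNat 1) 0 = 0 := by decide
  have d2 : pvDxA.getD (Int.toNat 2) 0 = 1 := by decide
  have d3 : pvDxA.getD (Int.toNat 3) 0 = 0 := by decide
  have e0 : pvDyA.getD (Int.toNat 0) 0 = 0 := by decide
  have e1 : pvDyA.getD (Int.toNat 1) 0 = -1 := by decide
  have e2 : pvDyA.getD (Int.toNat 2) 0 = 0 := by decide
  have e3 : pvDyA.getD (Int.toNat 3) 0 = 1 := by decide
  rw [d0, e0, d1, e1, d2, e2, d3, e3,
    pvScan_eq n S g hok hS, pvScan_eq n S g hok hS,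
    pvScan_eq n S g hok hS, pvScan_eq n S g hok hS]

-- the X-cells of the grid after one placement
theorem pvFilter_erase {α : Type} [BEq α] [LawfulBEq α] :
    ∀ (l : List α) (p q : α → Bool) (x : α), l.Nodup → x ∈ l → p x = true → q x = false →
      (∀ y ∈ l, y ≠ x → q y = p y) → l.filter q = (l.filter p).erase x := by
  intro l
  induction l with
  | nil => intro p q x _ hx; simp at hx
  | cons a l ih =>
    intro p q x hnd hx hpx hqx hagree
    by_cases hax : a = x
    · subst hax
      rw [List.filter_cons_of_neg (by simp [hqx]), List.filter_cons_of_pos (by simp [hpx]),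
        List.erase_cons_head]
      apply List.filter_congr
      intro y hy
      exact hagree y (by simp [hy]) (fun he => (List.nodup_cons.mp hnd).1 (he ▸ hy))
    · have hx' : x ∈ l := by
        rcases List.mem_cons.mp hx with h | h
        · exact absurd h.symm hax
        · exact h
      have hqa : q a = p a := hagree a (by simp) hax
      have hih := ih p q x (List.nodup_cons.mp hnd).2 hx' hpx hqx
        (fun y hy hne => hagree y (by simp [hy]) hne)
      by_cases hpa : p a = true
      · rw [List.filter_cons_of_pos (by simp [hqa, hpa]), List.filter_cons_of_pos (by simp [hpa]),
          List.erase_cons_tail (by simp [hax]), hih]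
      · rw [List.filter_cons_of_neg (by simp [hqa, hpa]), List.filter_cons_of_neg (by simp [hpa]),
          hih]

theorem pvCellsB_place (n : Int) (g : List (List String)) (a b : Int)
    (hok : pvRowOK n g) (hmem : (a, b) ∈ pvCellsB n g "X") :
    pvCellsB n (pvPlace g a b) "X" = (pvCellsB n g "X").erase (a, b) := by
  obtain ⟨hab, hval⟩ := (pvMem_cellsB n g "X" (a, b)).mp hmem
  rw [pvCellsB_eq_filter, pvCellsB_eq_filter]
  apply pvFilter_erase (pvAll n) _ _ (a, b) (pvAll_nodup n)
    ((pvMem_all n (a, b)).mpr hab)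
  · simp only at hval
    simp [hval]
  · rw [pvCell_place n g hok a b a b hab hab]
    simp
  · intro y hy hne
    have hyin : pvInB n y := (pvMem_all n y).mp hy
    have hcc : pvCell (pvPlace g a b) y.1 y.2 = pvCell g y.1 y.2 := by
      rw [pvCell_place n g hok a b y.1 y.2 hab (by simpa using hyin), if_neg]
      intro he
      apply hne
      rw [he]
    rw [hcc]

theorem pvFlatMapMap {α β γ δ : Type} (L : List α) (f : α → List β) (m : α → β → γ)
    (F : γ → List δ) :
    (L.flatMap (fun i => (f i).map (m i))).flatMap F
      = L.flatMap (fun i => (f i).flatMap (fun j => F (m i j))) := by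
  rw [List.flatMap_assoc]
  simp only [List.flatMap_map]

-- the nested dfs loop as a flatMap over the X-cells
theorem pvDfsA_succ (n : Int) (T : List (Int × Int)) (k : Nat) (g : List (List String)) :
    pvDfsA n T (k+1) g
      = (pvCellsB n g "X").flatMap (fun p => pvDfsA n T k (pvPlace g p.1 p.2)) := by
  show (PySem.List.pyRange 0 n 1).foldl _ [] = _
  rw [pvLoop2 (PySem.List.pyRange 0 n 1) (fun i j => pvCell g i j == "X")
      (fun i j => pvDfsA n T k (pvPlace g i j)) (PySem.List.pyRange 0 n 1) [],
    List.nil_append]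
  rw [pvCellsB, pvFlatMapMap]

theorem pvAny_flatMap {α β : Type} (l : List α) (f : α → List β) (q : β → Bool) :
    (l.flatMap f).any q = l.any fun a => (f a).any q := by
  induction l with
  | nil => rfl
  | cons a l ih => simp [List.flatMap_cons, List.any_append, ih]

-- characterisation of the DFS: some enumerated placement sequence succeeds iff some nodup list
-- of k X-cells placed at once succeeds
theorem pvDfs_any (n : Int) (T : List (Int × Int)) :
    ∀ (k : Nat) (g : List (List String)), pvRowOK n g →
    ((pvDfsA n T k g).any (fun b => b) = true
      ↔ ∃ S : List (Int × Int), S.length = k ∧ S.Nodup ∧ (∀ p ∈ S, p ∈ pvCellsB n g "X") ∧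
          pvAvoidAllA n (pvPlaceL S g) T = true) := by
  intro k
  induction k with
  | zero =>
    intro g _
    constructor
    · intro h
      exact ⟨[], rfl, List.nodup_nil, by simp, by simpa [pvDfsA, pvPlaceL] using h⟩
    · rintro ⟨S, hlen, -, -, hav⟩
      have hS : S = [] := List.length_eq_zero_iff.mp hlen
      subst hS
      simpa [pvDfsA, pvPlaceL] using hav
  | succ k ih =>
    intro g hok
    rw [pvDfsA_succ, pvAny_flatMap, List.any_eq_true]
    constructor
    · rintro ⟨p, hp, hany⟩
      obtain ⟨pa, pb⟩ := p
      obtain ⟨S, hlen, hnd, hsub, hav⟩ :=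
        (ih (pvPlace g pa pb) (pvPlace_rowOK n g pa pb hok)).mp hany
      have hsub' : ∀ q ∈ S, q ∈ (pvCellsB n g "X").erase (pa, pb) := by
        intro q hq
        have := hsub q hq
        rwa [pvCellsB_place n g pa pb hok hp] at this
      have hpnot : (pa, pb) ∉ S := by
        intro hin
        exact ((pvCellsB_nodup n g "X").mem_erase_iff.mp (hsub' (pa, pb) hin)).1 rfl
      refine ⟨(pa, pb) :: S, by simp [hlen], List.nodup_cons.mpr ⟨hpnot, hnd⟩, ?_, ?_⟩
      · intro q hq
        rcases List.mem_cons.mp hq with h | h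
        · exact h ▸ hp
        · exact List.erase_subset (hsub' q h)
      · have he : pvPlaceL ((pa, pb) :: S) g = pvPlaceL S (pvPlace g pa pb) := rfl
        rw [he]
        exact hav
    · rintro ⟨S', hlen, hnd, hsub, hav⟩
      cases S' with
      | nil => simp at hlen
      | cons p S =>
        obtain ⟨pa, pb⟩ := p
        have hp : (pa, pb) ∈ pvCellsB n g "X" := hsub (pa, pb) (by simp)
        refine ⟨(pa, pb), hp, ?_⟩
        apply (ih (pvPlace g pa pb) (pvPlace_rowOK n g pa pb hok)).mpr
        have hpnot : (pa, pb) ∉ S := (List.nodup_cons.mp hnd).1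
        refine ⟨S, by simpa using hlen, (List.nodup_cons.mp hnd).2, ?_, hav⟩
        intro q hq
        rw [pvCellsB_place n g pa pb hok hp]
        apply (pvCellsB_nodup n g "X").mem_erase_iff.mpr
        exact ⟨fun he => hpnot (he ▸ hq), hsub q (by simp [hq])⟩

-- characterisation of pick: k-element sublists
theorem pvPick_any :
    ∀ (l : List (Int × Int)) (k : Nat) (C : List (Int × Int) → Bool),
    ((pvPick l k).any C = true
      ↔ ∃ S : List (Int × Int), List.Sublist S l ∧ S.length = k ∧ C S = true) := by
  intro l
  induction l with
  | nil =>
    intro k C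
    cases k with
    | zero =>
      simp only [pvPick, List.any_cons, List.any_nil, Bool.or_false]
      constructor
      · intro h; exact ⟨[], List.Sublist.refl [], rfl, h⟩
      · rintro ⟨S, hsub, hlen, hC⟩
        have hS : S = [] := List.sublist_nil.mp hsub
        subst hS; exact hC
    | succ k =>
      simp only [pvPick, List.any_nil]
      constructor
      · intro h; simp at h
      · rintro ⟨S, hsub, hlen, -⟩
        have hS : S = [] := List.sublist_nil.mp hsub
        subst hS; simp at hlen
  | cons c rest ih =>
    intro k C
    cases k with
    | zero =>
      simp only [pvPick, List.any_cons, List.any_nil, Bool.or_false]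
      constructor
      · intro h; exact ⟨[], List.nil_sublist _, rfl, h⟩
      · rintro ⟨S, hsub, hlen, hC⟩
        have hS : S = [] := List.length_eq_zero_iff.mp hlen
        subst hS; exact hC
    | succ k =>
      simp only [pvPick, List.any_append, List.any_map, Bool.or_eq_true, Function.comp_def]
      rw [ih k (fun t => C (c :: t)), ih (k+1) C]
      constructor
      · rintro (⟨S, hsub, hlen, hC⟩ | ⟨S, hsub, hlen, hC⟩)
        · exact ⟨c :: S, List.Sublist.cons₂ c hsub, by simp [hlen], hC⟩
        · exact ⟨S, List.Sublist.cons c hsub, hlen, hC⟩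
      · rintro ⟨S, hsub, hlen, hC⟩
        rcases List.sublist_cons_iff.mp hsub with h | ⟨r, he, hr⟩
        · exact Or.inr ⟨S, h, hlen, hC⟩
        · subst he
          exact Or.inl ⟨r, hr, by simpa using hlen, hC⟩

theorem pvScanB_congr (n : Int) (g : List (List String)) (o₁ o₂ : List (Int × Int))
    (h : ∀ q, q ∈ o₁ ↔ q ∈ o₂) :
    ∀ (x y dx dy : Int) (l : List Int),
    pvScanB n g x y dx dy o₁ l = pvScanB n g x y dx dy o₂ l := by
  intro x y dx dy l
  induction l with
  | nil => rfl
  | cons i rest ih =>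
    simp only [pvScanB]
    simp only [h (x + dx * i, y + dy * i), ih]

theorem pvCheck_congr (n : Int) (g : List (List String)) (T o₁ o₂ : List (Int × Int))
    (h : ∀ q, q ∈ o₁ ↔ q ∈ o₂) :
    (T.all fun p => ! pvSeesB n g p.1 p.2 o₁) = (T.all fun p => ! pvSeesB n g p.1 p.2 o₂) := by
  apply pvAllCongr
  intro p _
  congr 1
  unfold pvSeesB
  simp only [pvScanB_congr n g o₁ o₂ h]

-- ===== VERDICT (by name: the statement is the Claim_ definition above) =====
theorem solution_spec : Claim_equal_solution := by
  intro n array hdom hpre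
  unfold Spec_solution solution solution_alt
  clear hdom
  have hok := pvRowOK_of_pre n array hpre
  rw [pvTeachersA_eq]
  have hiff :
      ((pvDfsA n (pvCellsB n array "T") 3 array).any (fun b => b) = true)
        ↔ ((pvPick (pvCellsB n array "X") 3).any
            (fun obs => (pvCellsB n array "T").all fun p => ! pvSeesB n array p.1 p.2 obs)
            = true) := by
    rw [pvDfs_any n (pvCellsB n array "T") 3 array hok,
      pvPick_any (pvCellsB n array "X") 3
        (fun obs => (pvCellsB n array "T").all fun p => ! pvSeesB n array p.1 p.2 obs)]
    constructor
    · rintro ⟨S, hlen, hnd, hsub, hav⟩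
      have hSin : ∀ p ∈ S, pvInB n p :=
        fun p hp => ((pvMem_cellsB n array "X" p).mp (hsub p hp)).1
      rw [pvAvoid_eq n S array (pvCellsB n array "T") hok hSin] at hav
      obtain ⟨l', hperm, hsubl⟩ := hnd.subperm (fun p hp => hsub p hp)
      refine ⟨l', hsubl, by rw [hperm.length_eq, hlen], ?_⟩
      rw [pvCheck_congr n array (pvCellsB n array "T") l' S (fun q => hperm.mem_iff)]
      exact hav
    · rintro ⟨S, hsub, hlen, hC⟩
      have hnd := hsub.nodup (pvCellsB_nodup n array "X")
      have hmem : ∀ p ∈ S, p ∈ pvCellsB n array "X" := fun p hp => hsub.subset hp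
      refine ⟨S, hlen, hnd, hmem, ?_⟩
      rw [pvAvoid_eq n S array (pvCellsB n array "T") hok
        (fun p hp => ((pvMem_cellsB n array "X" p).mp (hmem p hp)).1)]
      exact hC
  rcases hA : (pvDfsA n (pvCellsB n array "T") 3 array).any (fun b => b) <;>
    rcases hB : (pvPick (pvCellsB n array "X") 3).any
      (fun obs => (pvCellsB n array "T").all fun p => ! pvSeesB n array p.1 p.2 obs) <;>
    simp_all
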